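-- pv_equiv track=rewrite | github.com/enternityFan/LeetCodePythonVersion | 记忆化搜索/面试题13. 机器人的运动范围.py | get
-- ===== SOURCE A (Python) =====
-- def get(i,j):
--     tmp = 0
--     while i:
--         tmp +=i % 10
--         i //=10
--     while j:
--         tmp +=j % 10
--         j //=10
--     return tmp
-- ===== SOURCE B (Python) =====
-- def get(i, j):
--     return sum(int(c) for c in str(i) + str(j))
-- ===== Notes on version B (the rewrite author's own statement) =====
-- stated objective: idiomatic
-- what changed: Replaces the two %10//10 arithmetic extraction loops with a single pass over the decimal string representation str(i)+str(j), summing the digit characters.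
import Mathlib
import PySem

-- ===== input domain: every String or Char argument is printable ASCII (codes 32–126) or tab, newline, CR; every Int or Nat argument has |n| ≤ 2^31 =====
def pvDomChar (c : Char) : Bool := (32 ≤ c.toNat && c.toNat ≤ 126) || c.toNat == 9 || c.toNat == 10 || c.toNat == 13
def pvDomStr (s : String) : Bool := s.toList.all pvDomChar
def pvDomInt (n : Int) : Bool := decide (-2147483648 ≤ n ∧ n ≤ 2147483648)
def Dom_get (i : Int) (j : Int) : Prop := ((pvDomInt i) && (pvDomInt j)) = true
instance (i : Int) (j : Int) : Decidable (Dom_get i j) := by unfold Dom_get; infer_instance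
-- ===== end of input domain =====

-- B replaces A's two %10 // 10 arithmetic extraction loops by one pass over the
-- decimal string str(i)+str(j), summing the digit characters (idiomatic rewrite).


-- ===== PORT A =====
-- A's while-loop 'while n: tmp += n % 10; n //= 10'.  Python never terminates on
-- negative n; the 'n < 0 → tmp' branch is only a totality guard (outside Pre_).
def pvLoopA (n : Int) (tmp : Int) : Int :=
  if n = 0 then tmp
  else if n < 0 then tmp
  else pvLoopA (PySem.Int.floordiv n 10) (tmp + PySem.Int.mod n 10)
termination_by n.toNat
decreasing_by simp_all [PySem.Int.floordiv, Int.fdiv_eq_ediv]; omega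

def get (i : Int) (j : Int) : Int :=
  pvLoopA j (pvLoopA i 0)

-- ===== PORT B =====
-- sum(int(c) for c in str(i) + str(j)); int(c) on the single digit character c is
-- ported as its code minus 48 (exact on the digit characters str produces here).
def get_alt (i : Int) (j : Int) : Int :=
  (((PySem.Int.toStr i) ++ (PySem.Int.toStr j)).toList.map
      (fun c => (c.toNat : Int) - 48)).sum

-- ===== PRECONDITION & SPEC =====
-- Pre_ excludes negative inputs: there A's while-loop never terminates (no value
-- is returned), while B raises ValueError on the '-' character.
def Pre_get (i : Int) (j : Int) : Prop := 0 ≤ i ∧ 0 ≤ j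
instance (i : Int) (j : Int) : Decidable (Pre_get i j) := by unfold Pre_get; infer_instance
def pvWitness_get : Int × Int := (12, 345)

def Spec_get (i : Int) (j : Int) (out : Int) : Prop := out = get_alt i j
instance (i : Int) (j : Int) (out : Int) : Decidable (Spec_get i j out) := by unfold Spec_get; infer_instance

-- ===== CLAIM (what is proved, stated in full; the proofs are below) =====
def Claim_equal_get : Prop := ∀ (i : Int) (j : Int), Dom_get i j → Pre_get i j → Spec_get i j (get i j)

-- ===== LEMMAS AND PROOFS =====

lemma pv_digitChar_toNat {d : Nat} (hd : d < 10) : (Nat.digitChar d).toNat = 48 + d := by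
  interval_cases d <;> decide

-- character-sum of Nat.toDigitsCore equals the base-10 digit sum (with enough fuel)
lemma pv_toDigitsCore_sum (f : Nat) : ∀ (n : Nat) (ds : List Char), n < 10 ^ f →
    ((Nat.toDigitsCore 10 f n ds).map (fun c => (c.toNat : Int) - 48)).sum
      = ((Nat.digits 10 n).sum : Int) + ((ds.map (fun c => (c.toNat : Int) - 48)).sum) := by
  induction f with
  | zero =>
    intro n ds h
    interval_cases n
    simp [Nat.toDigitsCore]
  | succ f ih =>
    intro n ds h
    rw [Nat.toDigitsCore]
    by_cases h0 : n / 10 = 0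
    · rw [if_pos h0]
      simp only [List.map_cons, List.sum_cons]
      rw [pv_digitChar_toNat (by omega : n % 10 < 10)]
      rcases Nat.eq_zero_or_pos n with h1 | h1
      · simp [h1]
      · rw [Nat.digits_def' (by norm_num : 1 < 10) h1, h0]
        simp only [Nat.digits_zero, List.sum_cons, List.sum_nil]
        push_cast
        ring
    · rw [if_neg h0]
      have hlt : n / 10 < 10 ^ f := Nat.div_lt_of_lt_mul (by rw [← pow_succ']; exact h)
      have hn : 0 < n := by omega
      rw [ih (n / 10) _ hlt]
      rw [Nat.digits_def' (by norm_num : 1 < 10) hn]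
      simp [pv_digitChar_toNat (Nat.mod_lt n (by norm_num) : n % 10 < 10)]
      ring

lemma pv_toDigits_sum (n : Nat) :
    ((Nat.toDigits 10 n).map (fun c => (c.toNat : Int) - 48)).sum
      = ((Nat.digits 10 n).sum : Int) := by
  have h : n < 10 ^ (n + 1) :=
    lt_of_lt_of_le (Nat.lt_pow_self (by norm_num)) (Nat.pow_le_pow_right (by norm_num) (by omega))
  simpa using pv_toDigitsCore_sum (n + 1) n [] h

lemma pv_loopA_eq (m : Nat) : ∀ (tmp : Int),
    pvLoopA (m : Int) tmp = tmp + ((Nat.digits 10 m).sum : Int) := by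
  induction m using Nat.strong_induction_on with
  | _ m ih =>
    intro tmp
    rw [pvLoopA]
    rcases Nat.eq_zero_or_pos m with h0 | h0
    · simp [h0]
    · have hdiv : PySem.Int.floordiv (m : Int) 10 = ((m / 10 : Nat) : Int) := by
        simp [PySem.Int.floordiv, Int.fdiv_eq_ediv]
      have hmod : PySem.Int.mod (m : Int) 10 = ((m % 10 : Nat) : Int) := by
        simp [PySem.Int.mod, Int.fmod_eq_emod]
      rw [if_neg (by exact_mod_cast h0.ne'), if_neg (by omega), hdiv, hmod,
          ih (m / 10) (by omega), Nat.digits_def' (by norm_num : 1 < 10) h0]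
      simp only [List.sum_cons]
      push_cast
      ring

-- ===== VERDICT (by name: the statement is the Claim_ definition above) =====
theorem get_spec : Claim_equal_get := by
  intro i j _ hpre
  unfold Spec_get _root_.get get_alt
  obtain ⟨hi, hj⟩ := hpre
  have hi' : (i.toNat : Int) = i := Int.toNat_of_nonneg hi
  have hj' : (j.toNat : Int) = j := Int.toNat_of_nonneg hj
  have hchars : ∀ n : Int, 0 ≤ n → (PySem.Int.toStr n).toList = Nat.toDigits 10 n.toNat := by
    intro n hn
    rw [PySem.Int.toList_toStr, PySem.Int.toChars, if_neg (by omega)]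
  rw [String.toList_append, hchars i hi, hchars j hj, List.map_append, List.sum_append,
      pv_toDigits_sum, pv_toDigits_sum]
  rw [← hi', ← hj', pv_loopA_eq, pv_loopA_eq]
  simp only [Int.toNat_natCast]
  ring
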